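-- pv_equiv track=rewrite | github.com/SunMinqiu/NonStopZO2 | zo_rng/zo_rng/reference.py | philox4x32_10
-- ===== SOURCE A (Python) =====
-- PHILOX_M4x32_0 = 0xD2511F53
--
-- PHILOX_M4x32_1 = 0xCD9E8D57
--
-- PHILOX_W32_0 = 0x9E3779B9
--
-- PHILOX_W32_1 = 0xBB67AE85
--
-- MASK32 = 0xFFFFFFFF
--
-- def _mulhilo32(a, b):
--     """Multiply two uint32 values, return (lo, hi) as Python ints."""
--     product = a * b  # Python int: no overflow
--     lo = product & MASK32
--     hi = (product >> 32) & MASK32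
--     return lo, hi
--
-- def _philox4x32_round(ctr, key):
--     """One round of Philox4x32."""
--     lo0, hi0 = _mulhilo32(PHILOX_M4x32_0, ctr[0])
--     lo1, hi1 = _mulhilo32(PHILOX_M4x32_1, ctr[2])
--     return (
--         (hi1 ^ ctr[1] ^ key[0]) & MASK32,
--         lo1,
--         (hi0 ^ ctr[3] ^ key[1]) & MASK32,
--         lo0,
--     )
--
-- def _philox4x32_bumpkey(key):
--     """Bump the Philox key."""
--     return (
--         (key[0] + PHILOX_W32_0) & MASK32,
--         (key[1] + PHILOX_W32_1) & MASK32,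
--     )
--
-- def philox4x32_10(counter, key):
--     """Philox4x32-10: 10-round counter-based PRNG.
--
--     Args:
--         counter: tuple of 4 uint32 values.
--         key: tuple of 2 uint32 values.
--
--     Returns:
--         tuple of 4 uint32 values (the random output).
--     """
--     ctr = tuple(c & MASK32 for c in counter)
--     k = (key[0] & MASK32, key[1] & MASK32)
--
--     # Round 1 (no key bump)
--     ctr = _philox4x32_round(ctr, k)
--
--     # Rounds 2-10 (bump key before each)
--     for _ in range(9):
--         k = _philox4x32_bumpkey(k)
--         ctr = _philox4x32_round(ctr, k)
--
--     return ctr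
-- ===== SOURCE B (Python) =====
-- PHILOX_M4x32_0 = 0xD2511F53
-- PHILOX_M4x32_1 = 0xCD9E8D57
-- PHILOX_W32_0 = 0x9E3779B9
-- PHILOX_W32_1 = 0xBB67AE85
-- MASK32 = 0xFFFFFFFF
--
--
-- def philox4x32_10(counter, key):
--     """Philox4x32-10, written as a tail recursion over the round index r.
--
--     Instead of iteratively bumping the key, round r's key is obtained in
--     closed form: keys are bumped by a constant, so the r-times-bumped key
--     is (key + r*W) mod 2**32.  The (hi, lo) halves of the 32x32 products
--     come from a single divmod by 2**32.
--     """
--     k0, k1 = key[0] & MASK32, key[1] & MASK32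
--
--     def go(x0, x1, x2, x3, r):
--         if r == 10:
--             return (x0, x1, x2, x3)
--         hi0, lo0 = divmod(PHILOX_M4x32_0 * x0, 4294967296)
--         hi1, lo1 = divmod(PHILOX_M4x32_1 * x2, 4294967296)
--         return go((hi1 ^ x1 ^ ((k0 + r * PHILOX_W32_0) & MASK32)) & MASK32,
--                   lo1,
--                   (hi0 ^ x3 ^ ((k1 + r * PHILOX_W32_1) & MASK32)) & MASK32,
--                   lo0,
--                   r + 1)
--
--     return go(counter[0] & MASK32, counter[1] & MASK32,
--               counter[2] & MASK32, counter[3] & MASK32, 0)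
-- ===== Notes on version B (the rewrite author's own statement) =====
-- stated objective: alternative
-- what changed: B replaces A's imperative bump-then-round loop by a tail recursion over the round index r in which the round key is computed in closed form as (key + r*W) mod 2^32 (no iterated key bumping, no mutable key state) and the hi/lo product halves come from a single divmod by 2^32 instead of mask-and-shift.
import Mathlib
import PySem

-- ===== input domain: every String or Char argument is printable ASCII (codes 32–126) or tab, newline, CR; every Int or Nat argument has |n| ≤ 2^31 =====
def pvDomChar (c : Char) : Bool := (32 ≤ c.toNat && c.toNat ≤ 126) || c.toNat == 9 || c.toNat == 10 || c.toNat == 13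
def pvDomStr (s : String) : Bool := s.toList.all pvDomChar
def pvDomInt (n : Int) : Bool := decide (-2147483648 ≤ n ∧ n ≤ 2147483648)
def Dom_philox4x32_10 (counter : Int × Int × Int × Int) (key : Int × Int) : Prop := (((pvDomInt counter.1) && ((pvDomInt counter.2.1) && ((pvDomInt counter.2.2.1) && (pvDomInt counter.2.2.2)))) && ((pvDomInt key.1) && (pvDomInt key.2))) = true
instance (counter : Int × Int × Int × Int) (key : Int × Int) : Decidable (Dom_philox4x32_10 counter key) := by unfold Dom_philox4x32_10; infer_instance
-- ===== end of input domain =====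

-- B replaces A's bump-then-round loop by a tail recursion over the round index with the round key
-- in closed form ((key + r*W) mod 2^32) and divmod-by-2^32 product splitting (objective: alternative, same cost).


-- ===== PORT A =====
-- Philox constants as Int literals
def pvM0 : Int := 3528531795
def pvM1 : Int := 3449720151
def pvW0 : Int := 2654435769
def pvW1 : Int := 3144134277
def pvMask : Int := 4294967295

-- _mulhilo32: returns (lo, hi)
def pvMulhilo32 (a b : Int) : Int × Int :=
  let product := a * b
  (PySem.Int.band product pvMask, PySem.Int.band (product >>> 32) pvMask)

-- _philox4x32_round
def pvRound (ctr : Int × Int × Int × Int) (key : Int × Int) : Int × Int × Int × Int :=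
  let lh0 := pvMulhilo32 pvM0 ctr.1
  let lh1 := pvMulhilo32 pvM1 ctr.2.2.1
  (PySem.Int.band (PySem.Int.bxor (PySem.Int.bxor lh1.2 ctr.2.1) key.1) pvMask,
   lh1.1,
   PySem.Int.band (PySem.Int.bxor (PySem.Int.bxor lh0.2 ctr.2.2.2) key.2) pvMask,
   lh0.1)

-- _philox4x32_bumpkey
def pvBumpkey (key : Int × Int) : Int × Int :=
  (PySem.Int.band (key.1 + pvW0) pvMask, PySem.Int.band (key.2 + pvW1) pvMask)

-- Port of A: round 1 with the unbumped key, then a 9-iteration loop carrying (k, ctr),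
-- bumping the key before each round.
def philox4x32_10 (counter : Int × Int × Int × Int) (key : Int × Int) : Int × Int × Int × Int :=
  let ctr0 := (PySem.Int.band counter.1 pvMask, PySem.Int.band counter.2.1 pvMask,
               PySem.Int.band counter.2.2.1 pvMask, PySem.Int.band counter.2.2.2 pvMask)
  let k0 := (PySem.Int.band key.1 pvMask, PySem.Int.band key.2 pvMask)
  let ctr1 := pvRound ctr0 k0
  let st := (PySem.List.pyRange 0 9 1).foldl
    (fun (st : (Int × Int) × (Int × Int × Int × Int)) _ =>
      let k := pvBumpkey st.1
      (k, pvRound st.2 k)) (k0, ctr1)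
  st.2

-- ===== PORT B =====
-- Source B's inner 'go': tail recursion over the round index r; the round key is the closed form
-- (k + r*W) & MASK32, and divmod(p, 2^32) is ported as (floordiv p 2^32, mod p 2^32).
-- Python's 'if r == 10: return' is transcribed as the terminating guard '10 ≤ r'
-- (identical on every reachable call, r = 0..10; needed for Lean termination).
def pvGoB (k0 k1 x0 x1 x2 x3 : Int) (r : Nat) : Int × Int × Int × Int :=
  if 10 ≤ r then (x0, x1, x2, x3)
  else
    let dm0 := (PySem.Int.floordiv (pvM0 * x0) 4294967296, PySem.Int.mod (pvM0 * x0) 4294967296)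
    let dm1 := (PySem.Int.floordiv (pvM1 * x2) 4294967296, PySem.Int.mod (pvM1 * x2) 4294967296)
    pvGoB k0 k1
      (PySem.Int.band (PySem.Int.bxor (PySem.Int.bxor dm1.1 x1) (PySem.Int.band (k0 + (r : Int) * pvW0) pvMask)) pvMask)
      dm1.2
      (PySem.Int.band (PySem.Int.bxor (PySem.Int.bxor dm0.1 x3) (PySem.Int.band (k1 + (r : Int) * pvW1) pvMask)) pvMask)
      dm0.2
      (r + 1)
termination_by 10 - r

-- Port of B: mask key and counter once, then one tail-recursive descent from r = 0.
def philox4x32_10_alt (counter : Int × Int × Int × Int) (key : Int × Int) : Int × Int × Int × Int :=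
  pvGoB (PySem.Int.band key.1 pvMask) (PySem.Int.band key.2 pvMask)
    (PySem.Int.band counter.1 pvMask) (PySem.Int.band counter.2.1 pvMask)
    (PySem.Int.band counter.2.2.1 pvMask) (PySem.Int.band counter.2.2.2 pvMask) 0

-- ===== PRECONDITION & SPEC =====
def Spec_philox4x32_10 (counter : Int × Int × Int × Int) (key : Int × Int) (out : Int × Int × Int × Int) : Prop := out = philox4x32_10_alt counter key
instance (counter : Int × Int × Int × Int) (key : Int × Int) (out : Int × Int × Int × Int) : Decidable (Spec_philox4x32_10 counter key out) := by unfold Spec_philox4x32_10; infer_instance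

-- ===== CLAIM =====
def Claim_equal_philox4x32_10 : Prop := ∀ (counter : Int × Int × Int × Int) (key : Int × Int), Dom_philox4x32_10 counter key → Spec_philox4x32_10 counter key (philox4x32_10 counter key)

-- ===== LEMMAS AND PROOFS =====

-- Int >>> Int with a nonnegative literal shift is the Nat shift.
theorem pv_shift32 (p : Int) : p >>> (32:Int) = p >>> (32:Nat) := by
  cases p with
  | ofNat m => rfl
  | negSucc m => rfl

-- & 0xFFFFFFFF is reduction mod 2^32 (for every Int, Python two's-complement semantics).
theorem pv_band_mask (x : Int) : PySem.Int.band x 4294967295 = x % 4294967296 := by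
  have ht : (4294967295:Int).toNat = 4294967295 := rfl
  rcases le_or_gt 0 x with h | h
  · have hb : PySem.Int.band x 4294967295 = ((x.toNat &&& 4294967295 : Nat) : Int) := by
      unfold PySem.Int.band; rw [if_pos h, if_pos (by norm_num), ht]
    have hm := Nat.and_two_pow_sub_one_eq_mod x.toNat 32
    norm_num at hm
    rw [hb]; omega
  · have hb : PySem.Int.band x 4294967295 = (((4294967295:Nat) - (4294967295 &&& (-x-1).toNat) : Nat) : Int) := by
      unfold PySem.Int.band; rw [if_neg (by omega), if_pos (by norm_num), ht]
    have hm : (-x-1).toNat &&& 4294967295 = (-x-1).toNat % 4294967296 := by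
      have h2 := Nat.and_two_pow_sub_one_eq_mod (-x-1).toNat 32
      simpa only [show (2:Nat)^32 - 1 = 4294967295 from rfl, show (2:Nat)^32 = 4294967296 from rfl] using h2
    rw [Nat.and_comm] at hb
    rw [hb]; omega

-- A's loop, abstracted: apply the round with the current key, then bump, n times.
def pvAIter (n : Nat) (k : Int × Int) (s : Int × Int × Int × Int) : Int × Int × Int × Int :=
  match n with
  | 0 => s
  | n + 1 => pvAIter n (pvBumpkey k) (pvRound s k)

theorem pv_foldA (l : List Int) (k : Int × Int) (s : Int × Int × Int × Int) :
    ((l.foldl (fun (st : (Int × Int) × (Int × Int × Int × Int)) _ =>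
      let k := pvBumpkey st.1
      (k, pvRound st.2 k)) (k, s)).2) = pvAIter l.length (pvBumpkey k) s := by
  induction l generalizing k s with
  | nil => rfl
  | cons a t ih => simp only [List.foldl, List.length_cons, pvAIter]; exact ih _ _

-- The bridge: B's descent from round r equals A's remaining 10 - r rounds, whose key is the
-- closed form (K + r*W) mod 2^32.
theorem pv_bridge (n r : Nat) (h : r + n = 10) (K0 K1 x0 x1 x2 x3 : Int)
    (h0 : 0 ≤ x0) (h0' : x0 < 4294967296) (h2 : 0 ≤ x2) (h2' : x2 < 4294967296) :
    pvGoB K0 K1 x0 x1 x2 x3 r =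
      pvAIter n (PySem.Int.band (K0 + (r : Int) * pvW0) pvMask,
                 PySem.Int.band (K1 + (r : Int) * pvW1) pvMask) (x0, x1, x2, x3) := by
  induction n generalizing r x0 x1 x2 x3 with
  | zero =>
    have hr : r = 10 := by omega
    subst hr
    rw [pvGoB]
    simp [pvAIter]
  | succ n ih =>
    have hr : ¬ 10 ≤ r := by omega
    rw [pvGoB, if_neg hr]
    simp only [pvAIter]
    have hhi : ∀ (M x : Int), 0 ≤ x → x < 4294967296 → 0 ≤ M → M < 4294967296 →
        PySem.Int.floordiv (M * x) 4294967296 = PySem.Int.band ((M * x) >>> 32) pvMask := by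
      intro M x hx hx' hM hM'
      rw [PySem.Int.floordiv_eq_ediv_of_pos (by norm_num)]
      show _ = PySem.Int.band _ 4294967295
      rw [pv_shift32, Int.shiftRight_eq_div_pow, pv_band_mask]
      have hp : 0 ≤ M * x := mul_nonneg hM hx
      have hp' : M * x < 4294967296 * 4294967296 := by nlinarith
      norm_num
      omega
    have hlo : ∀ (p : Int), PySem.Int.mod p 4294967296 = PySem.Int.band p pvMask := by
      intro p
      rw [PySem.Int.mod_eq_emod_of_pos (by norm_num)]
      show _ = PySem.Int.band _ 4294967295
      rw [pv_band_mask]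
    rw [show pvRound (x0, x1, x2, x3)
          (PySem.Int.band (K0 + (r : Int) * pvW0) pvMask, PySem.Int.band (K1 + (r : Int) * pvW1) pvMask) =
        (PySem.Int.band (PySem.Int.bxor (PySem.Int.bxor (PySem.Int.band ((pvM1 * x2) >>> 32) pvMask) x1)
            (PySem.Int.band (K0 + (r : Int) * pvW0) pvMask)) pvMask,
         PySem.Int.band (pvM1 * x2) pvMask,
         PySem.Int.band (PySem.Int.bxor (PySem.Int.bxor (PySem.Int.band ((pvM0 * x0) >>> 32) pvMask) x3)
            (PySem.Int.band (K1 + (r : Int) * pvW1) pvMask)) pvMask,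
         PySem.Int.band (pvM0 * x0) pvMask) from rfl]
    rw [hhi pvM0 x0 h0 h0' (by norm_num [pvM0]) (by norm_num [pvM0]),
        hhi pvM1 x2 h2 h2' (by norm_num [pvM1]) (by norm_num [pvM1]),
        hlo (pvM0 * x0), hlo (pvM1 * x2)]
    have hbump : pvBumpkey (PySem.Int.band (K0 + (r : Int) * pvW0) pvMask,
                            PySem.Int.band (K1 + (r : Int) * pvW1) pvMask) =
        (PySem.Int.band (K0 + ((r : Int) + 1) * pvW0) pvMask,
         PySem.Int.band (K1 + ((r : Int) + 1) * pvW1) pvMask) := by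
      simp only [pvBumpkey, pvW0, pvW1, pvMask, pv_band_mask, Prod.mk.injEq]
      constructor <;> omega
    rw [hbump]
    have hrec := ih (r + 1) (by omega)
      (PySem.Int.band (PySem.Int.bxor (PySem.Int.bxor (PySem.Int.band ((pvM1 * x2) >>> 32) pvMask) x1)
          (PySem.Int.band (K0 + (r : Int) * pvW0) pvMask)) pvMask)
      (PySem.Int.band (pvM1 * x2) pvMask)
      (PySem.Int.band (PySem.Int.bxor (PySem.Int.bxor (PySem.Int.band ((pvM0 * x0) >>> 32) pvMask) x3)
          (PySem.Int.band (K1 + (r : Int) * pvW1) pvMask)) pvMask)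
      (PySem.Int.band (pvM0 * x0) pvMask)
      (by rw [show pvMask = (4294967295:Int) from rfl, pv_band_mask]; omega)
      (by rw [show pvMask = (4294967295:Int) from rfl, pv_band_mask]; omega)
      (by rw [show pvMask = (4294967295:Int) from rfl, pv_band_mask]; omega)
      (by rw [show pvMask = (4294967295:Int) from rfl, pv_band_mask]; omega)
    rw [hrec]
    push_cast
    ring_nf

-- ===== VERDICT =====
theorem philox4x32_10_spec : Claim_equal_philox4x32_10 := by
  intro counter key _
  show philox4x32_10 counter key = philox4x32_10_alt counter key
  obtain ⟨c0, c1, c2, c3⟩ := counter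
  obtain ⟨k0, k1⟩ := key
  have hlen : (PySem.List.pyRange 0 9 1).length = 9 := rfl
  have hmaskb : ∀ x : Int, 0 ≤ PySem.Int.band x pvMask ∧ PySem.Int.band x pvMask < 4294967296 := by
    intro x; rw [show pvMask = (4294967295:Int) from rfl, pv_band_mask]; omega
  have hK0 : PySem.Int.band (PySem.Int.band k0 pvMask + (0:Nat) * pvW0) pvMask = PySem.Int.band k0 pvMask := by
    simp only [pvMask, pv_band_mask]; push_cast; omega
  have hK1 : PySem.Int.band (PySem.Int.band k1 pvMask + (0:Nat) * pvW1) pvMask = PySem.Int.band k1 pvMask := by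
    simp only [pvMask, pv_band_mask]; push_cast; omega
  have hb := pv_bridge 10 0 (by omega)
    (PySem.Int.band k0 pvMask) (PySem.Int.band k1 pvMask)
    (PySem.Int.band c0 pvMask) (PySem.Int.band c1 pvMask)
    (PySem.Int.band c2 pvMask) (PySem.Int.band c3 pvMask)
    (hmaskb c0).1 (hmaskb c0).2 (hmaskb c2).1 (hmaskb c2).2
  rw [hK0, hK1] at hb
  show _ = pvGoB _ _ _ _ _ _ 0
  rw [hb]
  show ((PySem.List.pyRange 0 9 1).foldl _ (_, pvRound _ _)).2 = _
  rw [pv_foldA, hlen]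
  rfl
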